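-- pv_equiv track=rewrite | github.com/tom-naccarato/Advent-of-Code-2025 | Day3/part1.py | find_highest_number_in_line
-- ===== SOURCE A (Python) =====
-- def find_highest_number_in_line(nums):
--     """Start at the right hand side and find the highest two digit number that can be made."""
--     # Start at second last index and move to the left
--     max_after = nums[-1]
--     max_two_digit = int(nums[-2] + nums[-1])
--     # Iterate backwards through the list a d form two digit numbers with the current digit and the max digit seen so far
--     for i in range(len(nums) - 2, -1, -1):
--         current_max = int(nums[i] + max_after)
--         if current_max == 99:
--             return current_max # Early exit if we find the highest possible two digit number
--         if current_max > max_two_digit: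
--             max_two_digit = current_max # Update the highest two digit number found
--         if nums[i] > max_after:
--             max_after = nums[i] # Update the max digit seen so far
--
--     return max_two_digit
-- ===== SOURCE B (Python) =====
-- def find_highest_number_in_line(nums):
--     """Start at the right hand side and find the highest two digit number that can be made."""
--     n = len(nums)
--     # Pass 1: suffix_max[i] = max(nums[i+1:]) for i <= n-2 (pure string work, no parsing)
--     suffix_max = [None] * n
--     m = nums[-1]
--     for i in range(n - 2, -1, -1):
--         suffix_max[i] = m
--         m = max(m, nums[i])
--     # Pass 2: collect the two-digit candidates right to left, stopping at 99
--     candidates = [int(nums[-2] + nums[-1])]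
--     for i in range(n - 2, -1, -1):
--         candidates.append(int(nums[i] + suffix_max[i]))
--         if candidates[-1] == 99:
--             return 99
--     return max(candidates)
-- ===== Notes on version B (the rewrite author's own statement) =====
-- stated objective: alternative
-- what changed: A is one fused backward pass maintaining a running suffix maximum and a running best with inline comparisons; B splits the work into two passes -- it first precomputes a suffix-maximum table, then scans the candidates (same right-to-left order and 99 early return) into a list finished by max().
import Mathlib
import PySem

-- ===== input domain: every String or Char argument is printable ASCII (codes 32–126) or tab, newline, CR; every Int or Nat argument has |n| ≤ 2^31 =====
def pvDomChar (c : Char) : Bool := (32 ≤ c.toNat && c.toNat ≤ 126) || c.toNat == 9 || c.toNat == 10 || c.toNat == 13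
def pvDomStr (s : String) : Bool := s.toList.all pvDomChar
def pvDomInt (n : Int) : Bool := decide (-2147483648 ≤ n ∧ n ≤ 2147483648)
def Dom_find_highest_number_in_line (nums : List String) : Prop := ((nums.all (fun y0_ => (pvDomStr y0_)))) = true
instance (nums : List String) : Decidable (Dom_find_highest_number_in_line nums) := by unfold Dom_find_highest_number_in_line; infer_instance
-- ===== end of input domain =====

-- B replaces A's fused backward pass (running suffix maximum, running best, inline
-- comparisons) by two passes: a precomputed suffix-maximum table, then a backward pass
-- collecting the candidate list (with the same 99 early return) finished by max().

-- ===== PORT A =====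
-- Python string comparison/concatenation are ported on .toList (code points), as PYSEM.md states.
def aLoop (nums : List String) : Nat → String → Int → Int
  | 0, _, max_two_digit => max_two_digit
  | k + 1, max_after, max_two_digit =>
    let s := PySem.List.pyGetD nums (k : Int) ""
    let current_max := (PySem.Int.ofChars? (s.toList ++ max_after.toList)).getD 0
    if current_max = 99 then current_max
    else aLoop nums k (if max_after.toList < s.toList then s else max_after)
           (if max_two_digit < current_max then current_max else max_two_digit)

def find_highest_number_in_line (nums : List String) : Int :=
  let max_after := PySem.List.pyGetD nums (-1) ""
  let max_two_digit := (PySem.Int.ofChars? ((PySem.List.pyGetD nums (-2) "").toList ++ max_after.toList)).getD 0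
  aLoop nums (nums.length - 1) max_after max_two_digit

-- ===== PORT B =====
-- Pass 1 of Source B: suffix_max[i] = m, then m = max(m, nums[i]), for i = n-2 … 0; the port
-- builds the filled prefix suffix_max[0..n-2] by prepending (the trailing None cell of the
-- Python list is never read).
def bTabLoop (nums : List String) : Nat → String → List String → List String
  | 0, _, acc => acc
  | k + 1, m, acc =>
    let s := PySem.List.pyGetD nums (k : Int) ""
    bTabLoop nums k (if m.toList < s.toList then s else m) (m :: acc)

-- Pass 2 of Source B: candidates.append(int(nums[i] + suffix_max[i])); return 99 as soon as the
-- appended candidate is 99; after the loop, max(candidates).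
def bLoop (nums smax : List String) : Nat → List Int → Int
  | 0, cands => (PySem.List.max? cands (fun x => x)).getD 0
  | k + 1, cands =>
    let c := (PySem.Int.ofChars? ((PySem.List.pyGetD nums (k : Int) "").toList
      ++ (smax.getD k "").toList)).getD 0
    if c = 99 then 99
    else bLoop nums smax k (cands ++ [c])

def find_highest_number_in_line_alt (nums : List String) : Int :=
  let smax := bTabLoop nums (nums.length - 1) (PySem.List.pyGetD nums (-1) "") []
  let init := (PySem.Int.ofChars? ((PySem.List.pyGetD nums (-2) "").toList
    ++ (PySem.List.pyGetD nums (-1) "").toList)).getD 0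
  bLoop nums smax (nums.length - 1) [init]

-- ===== PRECONDITION & SPEC =====

-- the two-digit candidate Python builds at position i: int(nums[i] + max(nums[i+1:]))
-- (none where int() would raise ValueError)
def pvSufMax (nums : List String) (i : Nat) : String :=
  (PySem.List.max? (nums.drop (i + 1)) (fun s => s.toList)).getD ""
def pvCandO (nums : List String) (i : Nat) : Option Int :=
  PySem.Int.ofChars? ((nums.getD i "").toList ++ (pvSufMax nums i).toList)

-- Pre_ is exactly where the Python A (and B, which parses the same candidates in the same
-- right-to-left order) returns: at least two elements (else IndexError), and either the
-- typical input — a line of single digit strings, where every candidate parses — or, in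
-- general, any list in which no position whose candidate fails to parse is reached, i.e.
-- every unparsable candidate is preceded, at some higher index, by an unparsable or
-- 99-valued candidate that stops the right-to-left scan first.
def Pre_find_highest_number_in_line (nums : List String) : Prop :=
  2 ≤ nums.length ∧
  ((∀ s ∈ nums, s ∈ ["0", "1", "2", "3", "4", "5", "6", "7", "8", "9"]) ∨
    ∀ i < nums.length - 1, (pvCandO nums i).isSome ∨
      ∃ j < nums.length - 1, i < j ∧ (pvCandO nums j = none ∨ pvCandO nums j = PySem.Int.ofStr? "99"))
instance (nums : List String) : Decidable (Pre_find_highest_number_in_line nums) := by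
  unfold Pre_find_highest_number_in_line; infer_instance

def pvWitness_find_highest_number_in_line : List String := ["3", "1", "4", "1", "5"]

def Spec_find_highest_number_in_line (nums : List String) (out : Int) : Prop := out = find_highest_number_in_line_alt nums
instance (nums : List String) (out : Int) : Decidable (Spec_find_highest_number_in_line nums out) := by unfold Spec_find_highest_number_in_line; infer_instance

-- ===== CLAIM (what is proved, stated in full; the proofs are below) =====
def Claim_equal_find_highest_number_in_line : Prop := ∀ (nums : List String), Dom_find_highest_number_in_line nums → Pre_find_highest_number_in_line nums → Spec_find_highest_number_in_line nums (find_highest_number_in_line nums)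

-- ===== LEMMAS AND PROOFS =====

-- the candidate's Int value as both ports compute it (0 where it does not parse)
def vc (nums : List String) (i : Nat) : Int := (pvCandO nums i).getD 0

lemma max?_inst (xs : List String) :
    (@PySem.List.max? String (List Char) List.instLT (fun a b => a.decidableLT b) xs
      fun s => s.toList)
    = @PySem.List.max? String (List Char) List.instLinearOrder.toLT LinearOrder.toDecidableLT
        xs String.toList := by
  congr 1

-- Python max(l) for strings: the unique element that (string-)dominates the list
lemma max?_unique (l : List String) (m : String) (hm : m ∈ l)
    (hdom : ∀ y ∈ l, y.toList ≤ m.toList) :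
    PySem.List.max? l (fun s => s.toList) = some m := by
  cases hmx : PySem.List.max? l (fun s => s.toList) with
  | none =>
    rw [PySem.List.max?_eq_none_iff] at hmx
    simp [hmx] at hm
  | some m' =>
    have hm' : m' ∈ l := PySem.List.max?_mem hmx
    have h1 : m.toList ≤ m'.toList := PySem.List.max?_isMax (max?_inst _ ▸ hmx) m hm
    have h2 : m'.toList ≤ m.toList := hdom m' hm'
    rw [String.toList_inj.mp (le_antisymm h2 h1)]

-- Python max(l) for ints: any dominating member is the value max? returns
lemma int_max?_unique (l : List Int) (m : Int) (hm : m ∈ l)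
    (hdom : ∀ y ∈ l, y ≤ m) :
    PySem.List.max? l (fun x => x) = some m := by
  cases hmx : PySem.List.max? l (fun x => x) with
  | none =>
    rw [PySem.List.max?_eq_none_iff] at hmx
    simp [hmx] at hm
  | some m' =>
    have hm' : m' ∈ l := PySem.List.max?_mem hmx
    have h1 : m ≤ m' := PySem.List.max?_isMax hmx m hm
    have h2 : m' ≤ m := hdom m' hm'
    rw [le_antisymm h2 h1]

lemma foldl_max_swap (l : List Int) (a b : Int) :
    l.foldl max (max a b) = max b (l.foldl max a) := by
  induction l generalizing a with
  | nil => simp [List.foldl, max_comm]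
  | cons x t ih => simp only [List.foldl]; rw [max_right_comm, ih]

lemma foldl_max_mem (l : List Int) (a : Int) :
    l.foldl max a = a ∨ l.foldl max a ∈ l := by
  induction l generalizing a with
  | nil => left; rfl
  | cons x t ih =>
    simp only [List.foldl]
    rcases ih (max a x) with h | h
    · rcases max_choice a x with hm | hm
      · left; rw [h, hm]
      · right; rw [h, hm]; exact List.mem_cons_self ..
    · right; exact List.mem_cons_of_mem _ h

lemma pyGetD_neg_two (xs : List String) (h2 : 2 ≤ xs.length) (d : String) :
    PySem.List.pyGetD xs (-2) d = xs[xs.length - 2]'(by omega) := by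
  unfold PySem.List.pyGetD PySem.List.pyGet? PySem.List.pyIdx?
  rw [if_neg (by omega), if_pos (by omega)]
  rw [show ((-(-2 : Int)).toNat) = 2 by decide]
  simp [List.getElem?_eq_getElem (by omega : xs.length - 2 < xs.length)]

-- the starting suffix nums[len-1:] is the singleton last element, so its max? is that element
lemma drop_last_max (nums : List String) (h2 : 2 ≤ nums.length) :
    PySem.List.max? (nums.drop (nums.length - 1)) (fun s => s.toList)
      = some (nums[nums.length - 1]'(by omega)) := by
  have hcons : nums.drop (nums.length - 1)
      = [nums[nums.length - 1]'(by omega)] := by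
    rw [← List.getElem_cons_drop (by omega), List.drop_eq_nil_of_le (by omega)]
  rw [hcons]
  exact max?_unique _ _ (List.mem_singleton.mpr rfl)
    (fun y hy => by rw [List.mem_singleton.mp hy])

lemma sufMax_last (nums : List String) (h2 : 2 ≤ nums.length) :
    pvSufMax nums (nums.length - 2) = nums[nums.length - 1]'(by omega) := by
  unfold pvSufMax
  rw [show nums.length - 2 + 1 = nums.length - 1 by omega, drop_last_max nums h2]
  rfl

-- the step of the running suffix maximum (A's max_after, B's m)
lemma sufMax_step (nums : List String) (k : Nat) (hk : k + 1 < nums.length) (ma : String)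
    (hma : PySem.List.max? (nums.drop (k + 1)) (fun s => s.toList) = some ma) :
    PySem.List.max? (nums.drop k) (fun s => s.toList)
      = some (if ma.toList < nums[k].toList then nums[k] else ma) := by
  have hcons : nums.drop k = nums[k] :: nums.drop (k + 1) := by
    rw [List.getElem_cons_drop]
  have hmem : ma ∈ nums.drop (k + 1) := PySem.List.max?_mem hma
  have hdom : ∀ y ∈ nums.drop (k + 1), y.toList ≤ ma.toList :=
    fun y hy => PySem.List.max?_isMax (max?_inst _ ▸ hma) y hy
  apply max?_unique
  · rw [hcons]
    split
    · exact List.mem_cons_self ..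
    · exact List.mem_cons_of_mem _ hmem
  · intro y hy
    rw [hcons] at hy
    split
    · rename_i hlt
      rcases List.mem_cons.mp hy with rfl | hy
      · exact le_refl _
      · exact le_trans (hdom y hy) (le_of_lt hlt)
    · rename_i hnlt
      rcases List.mem_cons.mp hy with rfl | hy
      · exact not_lt.mp hnlt
      · exact hdom y hy

lemma pyGetD_nat (nums : List String) (k : Nat) (hk : k < nums.length) :
    PySem.List.pyGetD nums (k : Int) "" = nums[k] := by
  rw [PySem.List.pyGetD_eq_getElem _ _ (by omega) (by exact_mod_cast hk)]
  simp

-- A's loop, no early exit on the way: the running max of the candidates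
lemma aLoop_no99 (nums : List String) :
    ∀ (k : Nat), k < nums.length → ∀ (ma : String) (mtd : Int),
      PySem.List.max? (nums.drop k) (fun s => s.toList) = some ma →
      (∀ i < k, vc nums i ≠ 99) →
      aLoop nums k ma mtd = ((List.range k).map (vc nums)).foldl max mtd := by
  intro k
  induction k with
  | zero => intro _ ma mtd _ _; simp [aLoop]
  | succ k ih =>
    intro hk ma mtd hma h99
    have hkl : k < nums.length := by omega
    have hcm : (PySem.Int.ofChars? ((PySem.List.pyGetD nums (k : Int) "").toList ++ ma.toList)).getD 0
        = vc nums k := by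
      rw [pyGetD_nat nums k hkl]
      unfold vc pvCandO pvSufMax
      rw [hma, Option.getD_some, List.getD_eq_getElem _ _ hkl]
    have hrange : ((List.range (k + 1)).map (vc nums)).foldl max mtd
        = max (((List.range k).map (vc nums)).foldl max mtd) (vc nums k) := by
      rw [List.range_succ, List.map_append, List.foldl_append]
      simp [List.foldl]
    simp only [aLoop, hcm]
    rw [if_neg (h99 k (by omega))]
    have hmtd' : (if mtd < vc nums k then vc nums k else mtd) = max mtd (vc nums k) := by
      split <;> omega
    rw [pyGetD_nat nums k hkl, ih hkl _ _ (sufMax_step nums k hk ma hma)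
      (fun i hi => h99 i (by omega)), hmtd', foldl_max_swap, hrange, max_comm]

-- A's loop with a 99 candidate on the way: the early exit returns 99, whatever was seen before
lemma aLoop_99 (nums : List String) :
    ∀ (k : Nat), k < nums.length → ∀ (ma : String) (mtd : Int),
      PySem.List.max? (nums.drop k) (fun s => s.toList) = some ma →
      (∃ i < k, vc nums i = 99) →
      aLoop nums k ma mtd = 99 := by
  intro k
  induction k with
  | zero => intro _ ma mtd _ h; obtain ⟨i, hi, _⟩ := h; omega
  | succ k ih =>
    intro hk ma mtd hma h99
    have hkl : k < nums.length := by omega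
    have hcm : (PySem.Int.ofChars? ((PySem.List.pyGetD nums (k : Int) "").toList ++ ma.toList)).getD 0
        = vc nums k := by
      rw [pyGetD_nat nums k hkl]
      unfold vc pvCandO pvSufMax
      rw [hma, Option.getD_some, List.getD_eq_getElem _ _ hkl]
    simp only [aLoop, hcm]
    by_cases hk99 : vc nums k = 99
    · rw [if_pos hk99, hk99]
    · rw [if_neg hk99, pyGetD_nat nums k hkl]
      obtain ⟨i, hi, hvi⟩ := h99
      exact ih hkl _ _ (sufMax_step nums k hk ma hma)
        ⟨i, by rcases Nat.lt_succ_iff_lt_or_eq.mp hi with h | h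
               · exact h
               · exact absurd (h ▸ hvi) hk99, hvi⟩

-- the last element, as both ports read it
lemma last_read (nums : List String) (h2 : 2 ≤ nums.length) :
    PySem.List.pyGetD nums (-1) "" = nums[nums.length - 1]'(by omega) := by
  rw [PySem.List.pyGetD_neg_one nums ""
    (by intro h; rw [h] at h2; simp at h2), List.getLast_eq_getElem]

-- the initial best of both ports is the candidate at position len-2
lemma init_eq (nums : List String) (h2 : 2 ≤ nums.length) :
    (PySem.Int.ofChars? ((PySem.List.pyGetD nums (-2) "").toList
      ++ (PySem.List.pyGetD nums (-1) "").toList)).getD 0 = vc nums (nums.length - 2) := by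
  rw [last_read nums h2, pyGetD_neg_two nums h2]
  unfold vc pvCandO
  rw [sufMax_last nums h2, List.getD_eq_getElem _ _ (by omega)]

-- A on a list of length ≥ 2: the running max of all candidates, or 99 on an early exit
lemma A_val (nums : List String) (h2 : 2 ≤ nums.length) :
    find_highest_number_in_line nums
      = if ∃ i < nums.length - 1, vc nums i = 99 then 99
        else ((List.range (nums.length - 1)).map (vc nums)).foldl max
              (vc nums (nums.length - 2)) := by
  show aLoop nums (nums.length - 1) _ _ = _
  rw [init_eq nums h2, last_read nums h2]
  split
  · rename_i h
    exact aLoop_99 nums (nums.length - 1) (by omega) _ _ (drop_last_max nums h2) h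
  · rename_i h
    exact aLoop_no99 nums (nums.length - 1) (by omega) _ _ (drop_last_max nums h2)
      (fun i hi hv => h ⟨i, hi, hv⟩)

-- B's first pass fills the table with the suffix maxima
lemma bTab_eq (nums : List String) :
    ∀ (k : Nat), k < nums.length → ∀ (m : String) (acc : List String),
      PySem.List.max? (nums.drop k) (fun s => s.toList) = some m →
      bTabLoop nums k m acc = ((List.range k).map (pvSufMax nums)) ++ acc := by
  intro k
  induction k with
  | zero => intro _ m acc _; simp [bTabLoop]
  | succ k ih =>
    intro hk m acc hma
    have hkl : k < nums.length := by omega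
    have hm : pvSufMax nums k = m := by unfold pvSufMax; rw [hma]; rfl
    simp only [bTabLoop, pyGetD_nat nums k hkl]
    rw [ih hkl _ _ (sufMax_step nums k hk m hma), List.range_succ, List.map_append]
    simp [hm]

lemma smax_getD (nums : List String) (h2 : 2 ≤ nums.length)
    (k : Nat) (hk : k < nums.length - 1) :
    (bTabLoop nums (nums.length - 1) (PySem.List.pyGetD nums (-1) "") []).getD k ""
      = pvSufMax nums k := by
  rw [last_read nums h2,
    bTab_eq nums (nums.length - 1) (by omega) _ [] (drop_last_max nums h2),
    List.append_nil,
    List.getD_eq_getElem _ _ (by simpa using hk)]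
  simp

-- B's second pass, no 99 on the way: max? of the accumulated candidate list
lemma bLoop_no99 (nums smax : List String)
    (hsm : ∀ k < nums.length - 1, smax.getD k "" = pvSufMax nums k) :
    ∀ (k : Nat), k ≤ nums.length - 1 → ∀ (cands : List Int),
      (∀ i < k, vc nums i ≠ 99) →
      bLoop nums smax k cands
        = (PySem.List.max? (cands ++ ((List.range k).reverse.map (vc nums)))
            (fun x => x)).getD 0 := by
  intro k
  induction k with
  | zero => intro _ cands _; simp [bLoop]
  | succ k ih =>
    intro hk cands h99
    have hkl : k < nums.length := by omega
    have hc : (PySem.Int.ofChars? ((PySem.List.pyGetD nums (k : Int) "").toList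
        ++ (smax.getD k "").toList)).getD 0 = vc nums k := by
      rw [pyGetD_nat nums k hkl, hsm k (by omega)]
      unfold vc pvCandO
      rw [List.getD_eq_getElem _ _ hkl]
    simp only [bLoop, hc]
    rw [if_neg (h99 k (by omega)), ih (by omega) _ (fun i hi => h99 i (by omega))]
    have : (List.range (k + 1)).reverse.map (vc nums)
        = vc nums k :: (List.range k).reverse.map (vc nums) := by
      rw [List.range_succ]; simp
    rw [this]
    simp [List.append_assoc]

-- B's second pass with a 99 candidate on the way: the early return gives 99
lemma bLoop_99 (nums smax : List String)
    (hsm : ∀ k < nums.length - 1, smax.getD k "" = pvSufMax nums k) :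
    ∀ (k : Nat), k ≤ nums.length - 1 → ∀ (cands : List Int),
      (∃ i < k, vc nums i = 99) →
      bLoop nums smax k cands = 99 := by
  intro k
  induction k with
  | zero => intro _ cands h; obtain ⟨i, hi, _⟩ := h; omega
  | succ k ih =>
    intro hk cands h99
    have hkl : k < nums.length := by omega
    have hc : (PySem.Int.ofChars? ((PySem.List.pyGetD nums (k : Int) "").toList
        ++ (smax.getD k "").toList)).getD 0 = vc nums k := by
      rw [pyGetD_nat nums k hkl, hsm k (by omega)]
      unfold vc pvCandO
      rw [List.getD_eq_getElem _ _ hkl]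
    simp only [bLoop, hc]
    by_cases hk99 : vc nums k = 99
    · rw [if_pos hk99]
    · rw [if_neg hk99]
      obtain ⟨i, hi, hvi⟩ := h99
      exact ih (by omega) _
        ⟨i, by rcases Nat.lt_succ_iff_lt_or_eq.mp hi with h | h
               · exact h
               · exact absurd (h ▸ hvi) hk99, hvi⟩

-- B on a list of length ≥ 2: max? of init and all candidates, or 99 on an early return
lemma B_val (nums : List String) (h2 : 2 ≤ nums.length) :
    find_highest_number_in_line_alt nums
      = if ∃ i < nums.length - 1, vc nums i = 99 then 99
        else (PySem.List.max?
          (vc nums (nums.length - 2) :: ((List.range (nums.length - 1)).reverse.map (vc nums)))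
          (fun x => x)).getD 0 := by
  show bLoop nums _ (nums.length - 1) [_] = _
  rw [init_eq nums h2]
  split
  · rename_i h
    exact bLoop_99 nums _ (smax_getD nums h2) (nums.length - 1) (le_refl _) _ h
  · rename_i h
    rw [bLoop_no99 nums _ (smax_getD nums h2) (nums.length - 1) (le_refl _) _
      (fun i hi hv => h ⟨i, hi, hv⟩)]
    rfl

-- ===== VERDICT (by name: the statement is the Claim_ definition above) =====
theorem find_highest_number_in_line_spec : Claim_equal_find_highest_number_in_line := by
  intro nums _ hpre
  have h2 := hpre.1
  show find_highest_number_in_line nums = find_highest_number_in_line_alt nums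
  rw [A_val nums h2, B_val nums h2]
  split
  · rfl
  · set L := (List.range (nums.length - 1)).map (vc nums) with hL
    set a := vc nums (nums.length - 2) with ha
    have hmax : PySem.List.max? (a :: (List.range (nums.length - 1)).reverse.map (vc nums))
        (fun x => x) = some (L.foldl max a) := by
      apply int_max?_unique
      · rcases foldl_max_mem L a with h | h
        · rw [h]; exact List.mem_cons_self ..
        · apply List.mem_cons_of_mem
          rw [hL] at h
          obtain ⟨i, hi, hv⟩ := List.mem_map.mp h
          exact List.mem_map.mpr ⟨i, List.mem_reverse.mpr (List.mem_range.mpr (List.mem_range.mp hi)), hv⟩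
      · intro y hy
        rcases List.mem_cons.mp hy with rfl | hy
        · exact (PySem.List.le_foldl_max L a).1
        · obtain ⟨i, hi, rfl⟩ := List.mem_map.mp hy
          exact (PySem.List.le_foldl_max L a).2 _
            (List.mem_map.mpr ⟨i, List.mem_reverse.mp hi, rfl⟩)
    rw [hmax, Option.getD_some]
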